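-- pv_equiv track=rewrite | github.com/sajinavi2006/julomvp | mvp/src/juloserver/juloserver/julo/utils.py | display_bank_account_number
-- ===== SOURCE A (Python) =====
-- def display_bank_account_number(number):
--     display = ''
--     number_length = len(number)
--     i = 0
--
--     while i < number_length:
--         display += number[i]
--         if (i + 1) % 4 == 0:
--             display += ' '
--         i += 1
--     return display
-- ===== SOURCE B (Python) =====
-- def display_bank_account_number(number):
--     parts = []
--     for i in range(0, len(number), 4):
--         chunk = number[i:i + 4]
--         parts.append(chunk)
--         if len(chunk) == 4:
--             parts.append(' ')
--     return ''.join(parts)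
-- ===== Notes on version B (the rewrite author's own statement) =====
-- stated objective: faster
-- what changed: B slices the string into 4-character chunks with range(0, len, 4) and joins them once with the trailing-space rule per chunk, instead of A's char-by-char while loop that repeatedly concatenates onto the result string.
import Mathlib
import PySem

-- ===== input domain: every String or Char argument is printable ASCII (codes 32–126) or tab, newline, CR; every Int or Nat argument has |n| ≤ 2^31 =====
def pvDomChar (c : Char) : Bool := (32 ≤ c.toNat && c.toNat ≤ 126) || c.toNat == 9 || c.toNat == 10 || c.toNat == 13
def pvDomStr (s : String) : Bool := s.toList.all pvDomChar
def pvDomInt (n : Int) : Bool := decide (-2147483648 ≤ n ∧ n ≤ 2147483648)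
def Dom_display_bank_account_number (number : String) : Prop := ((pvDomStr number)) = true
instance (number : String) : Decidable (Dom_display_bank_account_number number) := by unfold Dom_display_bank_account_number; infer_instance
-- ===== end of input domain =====

-- B groups the digits by slicing 4-character chunks and appending the space per chunk, instead of A's
-- char-by-char while loop with a modulo-4 counter (objective: faster — one join instead of repeated concatenation; return values identical).

-- ===== PORT A =====
-- A's while loop: consume the characters in order, 'i' is the running index, 'display' the accumulator
-- (strings modelled as List Char per the PySem.Chars convention).
def pvLoopA : List Char → Nat → List Char → List Char
  | [], _, display => display
  | c :: rest, i, display =>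
      pvLoopA rest (i + 1) (if (i + 1) % 4 = 0 then display ++ [c] ++ [' '] else display ++ [c])

def display_bank_account_number (number : String) : String :=
  String.ofList (pvLoopA number.toList 0 [])

-- ===== PORT B =====
-- B's chunk loop: take number[i:i+4], then a space iff the chunk is full.
def pvChunksB : List Char → List Char
  | [] => []
  | l@(_ :: _) =>
      (l.take 4 ++ if (l.take 4).length = 4 then [' '] else []) ++ pvChunksB (l.drop 4)
  termination_by l => l.length

def display_bank_account_number_alt (number : String) : String :=
  String.ofList (pvChunksB number.toList)

-- ===== PRECONDITION & SPEC =====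
def Spec_display_bank_account_number (number : String) (out : String) : Prop := out = display_bank_account_number_alt number
instance (number : String) (out : String) : Decidable (Spec_display_bank_account_number number out) := by unfold Spec_display_bank_account_number; infer_instance

-- ===== CLAIM (what is proved, stated in full; the proofs are below) =====
def Claim_equal_display_bank_account_number : Prop := ∀ (number : String), Dom_display_bank_account_number number → Spec_display_bank_account_number number (display_bank_account_number number)

-- ===== LEMMAS AND PROOFS =====

-- Loop invariant: starting a chunk (i ≡ 0 mod 4), A's loop appends exactly B's chunked rendering.
lemma pvLoopA_eq_chunks : ∀ (n : Nat) (l : List Char), l.length ≤ n →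
    ∀ (i : Nat) (d : List Char), i % 4 = 0 → pvLoopA l i d = d ++ pvChunksB l := by
  intro n
  induction n with
  | zero =>
      intro l hl i d _
      interval_cases hlen : l.length
      cases l with
      | nil => simp [pvLoopA, pvChunksB]
      | cons a t => simp at hlen
  | succ n ih =>
      intro l hl i d hi
      match l with
      | [] => simp [pvLoopA, pvChunksB]
      | [a] =>
          have h1 : (i + 1) % 4 ≠ 0 := by omega
          simp [pvLoopA, pvChunksB, h1]
      | [a, b] =>
          have h1 : (i + 1) % 4 ≠ 0 := by omega
          have h2 : (i + 1 + 1) % 4 ≠ 0 := by omega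
          simp [pvLoopA, pvChunksB, h1, h2]
      | [a, b, c] =>
          have h1 : (i + 1) % 4 ≠ 0 := by omega
          have h2 : (i + 1 + 1) % 4 ≠ 0 := by omega
          have h3 : (i + 1 + 1 + 1) % 4 ≠ 0 := by omega
          simp [pvLoopA, pvChunksB, h1, h2, h3]
      | a :: b :: c :: e :: t =>
          have h1 : (i + 1) % 4 ≠ 0 := by omega
          have h2 : (i + 1 + 1) % 4 ≠ 0 := by omega
          have h3 : (i + 1 + 1 + 1) % 4 ≠ 0 := by omega
          have h4 : (i + 1 + 1 + 1 + 1) % 4 = 0 := by omega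
          have ht : t.length ≤ n := by simp at hl; omega
          rw [show pvChunksB (a :: b :: c :: e :: t)
                = (a :: b :: c :: e :: [' ']) ++ pvChunksB t by simp [pvChunksB]]
          simp only [pvLoopA, h1, h2, h3, h4, if_pos]
          rw [ih t ht (i + 1 + 1 + 1 + 1) _ h4]
          simp

-- ===== VERDICT (by name: the statement is the Claim_ definition above) =====
theorem display_bank_account_number_spec : Claim_equal_display_bank_account_number := by
  intro number _
  unfold Spec_display_bank_account_number display_bank_account_number display_bank_account_number_alt
  rw [pvLoopA_eq_chunks number.toList.length number.toList le_rfl 0 [] rfl]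
  simp
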